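-- pv_equiv track=rewrite | github.com/wishang06/AI_DSCUBED_Week2_Project1 | programs/stt/functions.py | get_conversation_snippet
-- ===== SOURCE A (Python) =====
-- from typing import List, Optional, Dict, Any, Set, Tuple
-- from collections import defaultdict as dd
--
-- def get_conversation_snippet(conversation: List[Dict[str, Any]]) -> Dict[str, List[str]]:
--     """
--     Get a snippet of the conversation for each speaker.
--     For LLM reference.
--     """
--
--     # key: speaker, value: list of sentences the speaker has spoken
--     snippet : Dict[str, List[str]] = dd(list)
--     for sentence in conversation:
--
--         # Ignore sentences that are too short
--         if len(sentence["sentence"]) < 10: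
--             continue
--
--         if len(snippet[sentence["speaker"]]) < 20:
--             snippet[sentence["speaker"]].append(sentence["sentence"])
--
--     return snippet
-- ===== SOURCE B (Python) =====
-- from collections import defaultdict as dd
--
-- def get_conversation_snippet(conversation):
--     # Pass 1: group ALL long-enough sentences by speaker.
--     groups = dd(list)
--     for sentence in conversation:
--         if len(sentence["sentence"]) >= 10:
--             groups[sentence["speaker"]].append(sentence["sentence"])
--     # Pass 2: keep only the first 20 per speaker.
--     snippet = dd(list)
--     for speaker, sentences in groups.items():
--         snippet[speaker] = sentences[:20]
--     return snippet
-- ===== Notes on version B (the rewrite author's own statement) =====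
-- stated objective: alternative
-- what changed: A caps each speaker's list at 20 inline inside one loop with a defaultdict membership side effect; B does a plain grouping pass collecting every long sentence per speaker and then a separate pass truncating each list to its first 20 with [:20].
import Mathlib
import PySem

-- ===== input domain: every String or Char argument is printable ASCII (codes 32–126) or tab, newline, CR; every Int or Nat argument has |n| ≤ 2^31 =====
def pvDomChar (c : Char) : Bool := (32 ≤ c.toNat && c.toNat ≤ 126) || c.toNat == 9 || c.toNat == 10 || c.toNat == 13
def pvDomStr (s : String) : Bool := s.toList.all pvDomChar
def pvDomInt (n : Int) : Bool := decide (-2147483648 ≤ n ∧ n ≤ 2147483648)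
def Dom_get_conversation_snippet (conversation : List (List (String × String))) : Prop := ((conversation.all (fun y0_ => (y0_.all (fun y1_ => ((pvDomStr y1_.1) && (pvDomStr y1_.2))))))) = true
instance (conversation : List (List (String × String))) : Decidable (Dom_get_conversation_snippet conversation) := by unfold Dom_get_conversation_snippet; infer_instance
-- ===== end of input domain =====

-- B restructures A's capped single pass into a grouping pass (all long sentences per speaker)
-- followed by a truncation pass ([:20] per speaker); same cost, different decomposition.

-- ===== PORT A =====
def get_conversation_snippet (conversation : List (List (String × String))) : List (String × List String) :=
  (conversation.foldl (fun (snippet : PySem.Dict String (List String)) sentence =>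
      let sd : PySem.Dict String String := ⟨sentence⟩
      let text := sd.getD "sentence" ""
      if PySem.Str.len text < 10 then snippet
      else
        let spk := sd.getD "speaker" ""
        -- defaultdict: reading snippet[spk] materialises [] for a missing key
        let snippet := snippet.setdefault spk []
        if (snippet.getD spk []).length < 20 then snippet.modify spk [] (· ++ [text])
        else snippet)
    PySem.Dict.empty).items

-- ===== PORT B =====
def get_conversation_snippet_alt (conversation : List (List (String × String))) : List (String × List String) :=
  let groups := conversation.foldl (fun (g : PySem.Dict String (List String)) sentence =>
      let sd : PySem.Dict String String := ⟨sentence⟩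
      if 10 ≤ PySem.Str.len (sd.getD "sentence" "") then
        g.modify (sd.getD "speaker" "") [] (· ++ [sd.getD "sentence" ""])
      else g)
    PySem.Dict.empty
  (groups.items.foldl (fun (r : PySem.Dict String (List String)) p =>
      r.insert p.1 (PySem.List.slice p.2 none (some 20)))
    PySem.Dict.empty).items

-- ===== PRECONDITION & SPEC =====
-- Pre_ excludes exactly the inputs where Python A raises KeyError: a sentence dict without a
-- "sentence" key, or a long-enough (>= 10 chars) sentence whose dict lacks a "speaker" key.
def Pre_get_conversation_snippet (conversation : List (List (String × String))) : Prop :=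
  ∀ s ∈ conversation,
    (PySem.Dict.mk s).contains "sentence" = true ∧
    (10 ≤ PySem.Str.len ((PySem.Dict.mk s).getD "sentence" "") →
      (PySem.Dict.mk s).contains "speaker" = true)
instance (conversation : List (List (String × String))) : Decidable (Pre_get_conversation_snippet conversation) := by unfold Pre_get_conversation_snippet; infer_instance

def pvWitness_get_conversation_snippet : (List (List (String × String))) :=
  [[("sentence", "hello there world"), ("speaker", "alice")],
   [("sentence", "hi"), ("speaker", "bob")]]

def Spec_get_conversation_snippet (conversation : List (List (String × String))) (out : List (String × List String)) : Prop := out = get_conversation_snippet_alt conversation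
instance (conversation : List (List (String × String))) (out : List (String × List String)) : Decidable (Spec_get_conversation_snippet conversation out) := by unfold Spec_get_conversation_snippet; infer_instance

-- ===== CLAIM (what is proved, stated in full; the proofs are below) =====
def Claim_equal_get_conversation_snippet : Prop := ∀ (conversation : List (List (String × String))), Dom_get_conversation_snippet conversation → Pre_get_conversation_snippet conversation → Spec_get_conversation_snippet conversation (get_conversation_snippet conversation)

-- ===== LEMMAS AND PROOFS =====

def pvStepA (snippet : PySem.Dict String (List String)) (sentence : List (String × String)) : PySem.Dict String (List String) :=
  if PySem.Str.len ((⟨sentence⟩ : PySem.Dict String String).getD "sentence" "") < 10 then snippet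
  else
    if (((snippet.setdefault ((⟨sentence⟩ : PySem.Dict String String).getD "speaker" "") []).getD
          ((⟨sentence⟩ : PySem.Dict String String).getD "speaker" "") []).length) < 20 then
      (snippet.setdefault ((⟨sentence⟩ : PySem.Dict String String).getD "speaker" "") []).modify
        ((⟨sentence⟩ : PySem.Dict String String).getD "speaker" "") []
        (· ++ [(⟨sentence⟩ : PySem.Dict String String).getD "sentence" ""])
    else snippet.setdefault ((⟨sentence⟩ : PySem.Dict String String).getD "speaker" "") []

def pvStepB (g : PySem.Dict String (List String)) (sentence : List (String × String)) : PySem.Dict String (List String) :=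
  if 10 ≤ PySem.Str.len ((⟨sentence⟩ : PySem.Dict String String).getD "sentence" "") then
    g.modify ((⟨sentence⟩ : PySem.Dict String String).getD "speaker" "") []
      (· ++ [(⟨sentence⟩ : PySem.Dict String String).getD "sentence" ""])
  else g

def pvTake (p : String × List String) : String × List String := (p.1, p.2.take 20)
def pvMT (d : PySem.Dict String (List String)) : PySem.Dict String (List String) := ⟨d.items.map pvTake⟩

lemma pvA_eq (c : List (List (String × String))) :
    get_conversation_snippet c = (List.foldl pvStepA PySem.Dict.empty c).items := rfl

lemma pvB_eq (c : List (List (String × String))) :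
    get_conversation_snippet_alt c =
      (List.foldl (fun (r : PySem.Dict String (List String)) p =>
          r.insert p.1 (PySem.List.slice p.2 none (some 20)))
        PySem.Dict.empty (List.foldl pvStepB PySem.Dict.empty c).items).items := rfl

lemma pvMT_contains (d : PySem.Dict String (List String)) (k : String) :
    (pvMT d).contains k = d.contains k := by
  simp [pvMT, PySem.Dict.contains, List.any_map, pvTake, Function.comp_def]

lemma pvMT_keys (d : PySem.Dict String (List String)) : (pvMT d).keys = d.keys := by
  simp [pvMT, PySem.Dict.keys, pvTake]

lemma pvMT_get? (d : PySem.Dict String (List String)) (k : String) :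
    (pvMT d).get? k = (d.get? k).map (List.take 20) := by
  simp [pvMT, PySem.Dict.get?, List.find?_map, pvTake, Function.comp_def, Option.map_map]

lemma pv_contains_iff (d : PySem.Dict String (List String)) (k : String) :
    d.contains k = true ↔ (d.get? k).isSome := by
  simp [PySem.Dict.contains, PySem.Dict.get?, List.any_eq_true, List.find?_isSome]

lemma pvMT_insert (d : PySem.Dict String (List String)) (k : String) (v : List String) :
    pvMT (d.insert k v) = (pvMT d).insert k (v.take 20) := by
  apply PySem.Dict.ext
  have hc : ((List.map pvTake d.items).any fun p => p.1 == k) = (d.items.any fun p => p.1 == k) := by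
    simp [List.any_map, pvTake, Function.comp_def]
  by_cases h : (d.items.any fun p => p.1 == k) = true
  · simp only [PySem.Dict.insert, PySem.Dict.contains, pvMT, hc, h, if_pos, List.map_map]
    exact List.map_congr_left (fun p _ => by
      by_cases hp : p.1 = k <;> simp [pvTake, hp])
  · have h2 : (d.items.any fun p => p.1 == k) = false := Bool.eq_false_iff.mpr h
    simp only [PySem.Dict.insert, PySem.Dict.contains, pvMT, hc, h2, Bool.false_eq_true,
      if_false, List.map_append]
    simp [pvTake]

lemma pv_map_replace_self (k : String) (v : List String) :
    ∀ (L : List (String × List String)), (L.map Prod.fst).Nodup →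
      List.find? (fun p => p.1 == k) L = some (k, v) →
      L.map (fun p => if p.1 == k then (k, v) else p) = L := by
  intro L
  induction L with
  | nil => intro _ h; simp at h
  | cons p L ih =>
    intro hnd hf
    by_cases hp : (p.1 == k) = true
    · rw [List.find?_cons_of_pos (p := fun q : String × List String => q.1 == k) hp] at hf
      have hpk : p.1 = k := by simpa using hp
      have hpv : p = (k, v) := by injection hf
      have hnotin : ∀ q ∈ L, ¬ (q.1 == k) = true := by
        intro q hq hqk
        rw [List.map_cons, List.nodup_cons] at hnd
        exact hnd.1 (by rw [hpk]; exact List.mem_map.mpr ⟨q, hq, by simpa using hqk⟩)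
      simp only [List.map_cons, if_pos hp]
      rw [hpv]
      congr 1
      calc L.map (fun p => if p.1 == k then (k, v) else p)
          = L.map id := List.map_congr_left (fun q hq => by simp [hnotin q hq])
        _ = L := List.map_id L
    · rw [List.find?_cons_of_neg (p := fun q : String × List String => q.1 == k) hp] at hf
      simp only [List.map_cons, if_neg hp]
      rw [ih (List.Nodup.of_cons (by simpa using hnd)) hf]

lemma pv_insert_get?_self (d : PySem.Dict String (List String)) (k : String) (v : List String)
    (h : d.get? k = some v) (hnd : d.keys.Nodup) : d.insert k v = d := by
  have hc : d.contains k = true := (pv_contains_iff d k).mpr (by simp [h])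
  obtain ⟨q, hq, hq2⟩ : ∃ q, List.find? (fun p => p.1 == k) d.items = some q ∧ q.2 = v := by
    simp only [PySem.Dict.get?, Option.map_eq_some_iff] at h
    exact ⟨h.choose, h.choose_spec.1, h.choose_spec.2⟩
  have hqk : q.1 = k := by
    have := List.find?_some hq; simpa using this
  have hq' : List.find? (fun p => p.1 == k) d.items = some (k, v) := by
    cases q; simp_all
  apply PySem.Dict.ext
  simp only [PySem.Dict.insert, hc, if_pos]
  exact pv_map_replace_self k v d.items (by simpa [PySem.Dict.keys] using hnd) hq'

lemma pv_stepB_nodup (g : PySem.Dict String (List String)) (hnd : g.keys.Nodup)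
    (s : List (String × String)) : (pvStepB g s).keys.Nodup := by
  unfold pvStepB
  by_cases h : 10 ≤ PySem.Str.len ((⟨s⟩ : PySem.Dict String String).getD "sentence" "")
  · rw [if_pos h]
    have := PySem.Dict.nodup_keys_foldl_modify_key [s]
      (fun s => (⟨s⟩ : PySem.Dict String String).getD "speaker" "") []
      (fun _ s => (· ++ [(⟨s⟩ : PySem.Dict String String).getD "sentence" ""])) g hnd
    simpa using this
  · rw [if_neg h]; exact hnd

lemma pv_step (g : PySem.Dict String (List String)) (hnd : g.keys.Nodup)
    (s : List (String × String)) : pvStepA (pvMT g) s = pvMT (pvStepB g s) := by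
  unfold pvStepA pvStepB
  by_cases hlen : PySem.Str.len ((⟨s⟩ : PySem.Dict String String).getD "sentence" "") < 10
  · rw [if_pos hlen, if_neg (by omega :
      ¬ 10 ≤ PySem.Str.len ((⟨s⟩ : PySem.Dict String String).getD "sentence" ""))]
  · rw [if_neg hlen, if_pos (by omega :
      10 ≤ PySem.Str.len ((⟨s⟩ : PySem.Dict String String).getD "sentence" ""))]
    generalize ((⟨s⟩ : PySem.Dict String String).getD "speaker" "") = spk
    generalize ((⟨s⟩ : PySem.Dict String String).getD "sentence" "") = text
    by_cases hc : g.contains spk = true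
    · rw [PySem.Dict.setdefault_of_contains _ _ (by rw [pvMT_contains]; exact hc)]
      obtain ⟨v, hv⟩ := Option.isSome_iff_exists.mp ((pv_contains_iff g _).mp hc)
      have hgd : (pvMT g).getD spk [] = v.take 20 := by
        simp [PySem.Dict.getD, pvMT_get?, hv]
      have hgdB : g.modify spk [] (· ++ [text]) = g.insert spk (v ++ [text]) := by
        simp [PySem.Dict.modify, PySem.Dict.getD, hv]
      rw [hgdB, pvMT_insert, hgd]
      by_cases hl : v.length < 20
      · rw [if_pos (by simp only [List.length_take]; omega)]
        have h1 : v.take 20 = v := List.take_of_length_le (by omega)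
        have h2 : (v ++ [text]).take 20 = v ++ [text] :=
          List.take_of_length_le (by simp; omega)
        rw [h2]
        simp only [PySem.Dict.modify, hgd, h1]
      · rw [if_neg (by simp only [List.length_take]; omega)]
        have h2 : (v ++ [text]).take 20 = v.take 20 := List.take_append_of_le_length (by omega)
        rw [h2]
        exact (pv_insert_get?_self (pvMT g) _ (v.take 20)
          (by simp [pvMT_get?, hv]) (by rw [pvMT_keys]; exact hnd)).symm
    · have hc' : g.contains spk = false := Bool.eq_false_iff.mpr hc
      have hv : g.get? spk = none := by
        cases h : g.get? spk with
        | none => rfl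
        | some v => exact absurd ((pv_contains_iff g spk).mpr (by simp [h])) hc
      rw [PySem.Dict.setdefault_of_not_contains _ _ (by rw [pvMT_contains]; exact hc')]
      have hmod : g.modify spk [] (· ++ [text]) = g.insert spk [text] := by
        simp [PySem.Dict.modify, PySem.Dict.getD, hv]
      rw [hmod, pvMT_insert]
      have htake : [text].take 20 = [text] := List.take_of_length_le (by simp)
      rw [htake]
      have hins : (((pvMT g).insert spk []).getD spk []) = [] := by
        simp [PySem.Dict.getD, PySem.Dict.get?_insert_self]
      rw [if_pos (by rw [hins]; simp)]
      rw [show (((pvMT g).insert spk []).modify spk [] (· ++ [text]))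
          = (((pvMT g).insert spk []).insert spk [text]) from by
        simp [PySem.Dict.modify, hins]]
      rw [PySem.Dict.insert_insert_self]

lemma pv_loop : ∀ (c : List (List (String × String))) (g : PySem.Dict String (List String)),
    g.keys.Nodup → List.foldl pvStepA (pvMT g) c = pvMT (List.foldl pvStepB g c) := by
  intro c
  induction c with
  | nil => intro g _; rfl
  | cons s c ih =>
    intro g hnd
    simp only [List.foldl_cons]
    rw [pv_step g hnd s]
    exact ih _ (pv_stepB_nodup g hnd s)

lemma pv_foldB_nodup : ∀ (c : List (List (String × String))) (g : PySem.Dict String (List String)),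
    g.keys.Nodup → (List.foldl pvStepB g c).keys.Nodup := by
  intro c
  induction c with
  | nil => intro g h; simpa using h
  | cons s c ih => intro g h; exact ih _ (pv_stepB_nodup g h s)

lemma pv_ab_eq : ∀ c, get_conversation_snippet c = get_conversation_snippet_alt c := by
  intro c
  rw [pvA_eq, pvB_eq]
  have hemp : pvMT PySem.Dict.empty = PySem.Dict.empty := rfl
  have hndemp : (PySem.Dict.empty : PySem.Dict String (List String)).keys.Nodup := by
    simp [PySem.Dict.empty, PySem.Dict.keys]
  have hA : List.foldl pvStepA PySem.Dict.empty c
      = pvMT (List.foldl pvStepB PySem.Dict.empty c) := by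
    rw [← hemp]; exact pv_loop c PySem.Dict.empty hndemp
  rw [hA]
  have hnd : ((List.foldl pvStepB PySem.Dict.empty c).items.map Prod.fst).Nodup := by
    have := pv_foldB_nodup c PySem.Dict.empty hndemp
    simpa [PySem.Dict.keys] using this
  have hfresh : ∀ a ∈ (List.foldl pvStepB PySem.Dict.empty c).items,
      (PySem.Dict.empty : PySem.Dict String (List String)).contains a.1 = false := by
    intro a _; rfl
  rw [PySem.Dict.items_foldl_insert_fresh (List.foldl pvStepB PySem.Dict.empty c).items Prod.fst
      (fun p => PySem.List.slice p.2 none (some 20)) PySem.Dict.empty hfresh hnd]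
  simp [pvMT, PySem.Dict.empty, pvTake, PySem.List.slice_to _ (by norm_num : (0:Int) ≤ (20:Int))]

-- ===== VERDICT (by name: the statement is the Claim_ definition above) =====
theorem get_conversation_snippet_spec : Claim_equal_get_conversation_snippet := by
  intro c _ _
  unfold Spec_get_conversation_snippet
  exact pv_ab_eq c
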